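-- pv_equiv track=rewrite | github.com/Pryowin/adventofcode2023 | day12/day12.py | get_all_possible_conditions
-- ===== SOURCE A (Python) =====
-- from collections import Counter
--
-- def convert_condition_to_int(condition: str, match) -> int:
--     length = len(condition)
--     ret_val = 0
--     for idx,chr in enumerate(condition):
--         if chr in match:
--             ret_val += pow(2,length-idx-1)
--     return ret_val
--
-- def has_correct_number_of_broken_pumps(condition: str, broken_count: int) -> bool:
--     return Counter(condition)["B"] == broken_count
--
-- def convert_int_to_condition(number: int, length: int) -> str:
--     bin_string =   '{0:b}'.format(number).zfill(length  )
--     return bin_string.replace("0","W").replace("1","B")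
--
-- def get_all_possible_conditions(incomplete_condition: str, numbers: list[int]) -> list[str]:
--     ret_val = []
--     broken_number = sum(numbers)
--     length_of_condition = len(incomplete_condition)
--     and_int_value = convert_condition_to_int(incomplete_condition, ["B"])
--     or_int_value = convert_condition_to_int(incomplete_condition, ["B", "?"])
--
--     max_value = pow(2,length_of_condition)
--     for i in range(and_int_value, max_value):
--         if (i & and_int_value  == and_int_value) and (i | or_int_value == or_int_value): # must match original pattern
--             condition = convert_int_to_condition(i, length_of_condition)
--             if has_correct_number_of_broken_pumps(condition, broken_number):
--                 ret_val.append(condition)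
--
--     return ret_val
-- ===== SOURCE B (Python) =====
-- def get_all_possible_conditions(incomplete_condition: str, numbers: list[int]) -> list[str]:
--     target = sum(numbers)
--
--     def gen(i: int, remaining: int) -> list:
--         if remaining < 0:
--             return []
--         if i == len(incomplete_condition):
--             return [""] if remaining == 0 else []
--         c = incomplete_condition[i]
--         if c == "?":
--             return ["W" + t for t in gen(i + 1, remaining)] + [
--                 "B" + t for t in gen(i + 1, remaining - 1)
--             ]
--         if c == "B":
--             return ["B" + t for t in gen(i + 1, remaining - 1)]
--         return ["W" + t for t in gen(i + 1, remaining)]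
--
--     return gen(0, target)
-- ===== Notes on version B (the rewrite author's own statement) =====
-- stated objective: faster
-- what changed: Replaced the exhaustive scan of all 2^len integers (bitmask-filtered, then converted to a string) by a recursive backtracking generator over the pattern that branches only at '?' characters and prunes when the remaining broken count goes negative, producing the results directly in the same increasing-bitvalue order.
-- intended difference: On the empty pattern with sum(numbers) == 0, A returns ['W'] (an artefact of '{0:b}'.format(0).zfill(0) being '0'), while B returns [''], the only completion of the empty pattern, which is the intended value. — e.g. on get_all_possible_conditions("", []): A returns ["W"], B returns [""]
import Mathlib
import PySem

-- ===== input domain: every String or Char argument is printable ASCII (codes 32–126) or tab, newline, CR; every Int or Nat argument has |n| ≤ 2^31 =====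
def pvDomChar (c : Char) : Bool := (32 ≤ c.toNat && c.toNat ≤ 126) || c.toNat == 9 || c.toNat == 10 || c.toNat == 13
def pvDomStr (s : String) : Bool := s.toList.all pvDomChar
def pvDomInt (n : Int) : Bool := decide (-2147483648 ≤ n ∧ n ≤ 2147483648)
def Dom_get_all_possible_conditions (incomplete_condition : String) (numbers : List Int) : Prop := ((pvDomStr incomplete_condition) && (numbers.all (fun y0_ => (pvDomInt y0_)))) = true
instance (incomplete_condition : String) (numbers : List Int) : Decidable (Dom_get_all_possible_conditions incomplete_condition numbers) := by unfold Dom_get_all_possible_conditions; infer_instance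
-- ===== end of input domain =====

-- B replaces A's exhaustive scan of all 2^len bitmasks by a recursive backtracking
-- generator that branches only at '?' characters (objective: faster, asymptotically).

-- ===== PORT A =====
-- for every element of `enumerate`, 0 ≤ idx < length, so the exponent is a
-- nonnegative int and `.toNat` is exact (Python: pow(2, length - idx - 1))
def convert_condition_to_int (condition : String) (match_ : List Char) : Int :=
  let length : Int := (condition.toList.length : Int)
  (PySem.List.enumerate condition.toList).foldl
    (fun ret_val p =>
      if p.2 ∈ match_ then ret_val + 2 ^ (length - p.1 - 1).toNat else ret_val) 0

def has_correct_number_of_broken_pumps (condition : String) (broken_count : Int) : Bool :=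
  (PySem.Dict.counter condition.toList).getD 'B' 0 == broken_count

def convert_int_to_condition (number : Int) (length : Int) : String :=
  let bin_string := PySem.Str.zfill (PySem.Int.toBin number) length
  PySem.Str.replace (PySem.Str.replace bin_string "0" "W") "1" "B"

-- pow(2, length_of_condition): the length is a nonnegative int, `.toNat` is exact
def get_all_possible_conditions (incomplete_condition : String) (numbers : List Int) : List String :=
  let broken_number := numbers.sum
  let length_of_condition : Int := (incomplete_condition.toList.length : Int)
  let and_int_value := convert_condition_to_int incomplete_condition ['B']
  let or_int_value := convert_condition_to_int incomplete_condition ['B', '?']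
  let max_value : Int := 2 ^ length_of_condition.toNat
  (PySem.List.pyRange and_int_value max_value 1).foldl
    (fun ret_val i =>
      if (PySem.Int.band i and_int_value == and_int_value) &&
          (PySem.Int.bor i or_int_value == or_int_value) then
        let condition := convert_int_to_condition i length_of_condition
        if has_correct_number_of_broken_pumps condition broken_number then
          ret_val ++ [condition]
        else ret_val
      else ret_val) []

-- ===== PORT B =====
-- Source B's gen(i, remaining): recursion over the pattern (index i ~ structural
-- recursion on the remaining character list), pruning when remaining < 0
def pvGen : List Char → Int → List String
  | cs, remaining =>
    if remaining < 0 then []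
    else
      match cs with
      | [] => if remaining == 0 then [""] else []
      | c :: rest =>
        if c == '?' then
          (pvGen rest remaining).map (fun t => "W" ++ t) ++
            (pvGen rest (remaining - 1)).map (fun t => "B" ++ t)
        else if c == 'B' then
          (pvGen rest (remaining - 1)).map (fun t => "B" ++ t)
        else
          (pvGen rest remaining).map (fun t => "W" ++ t)

def get_all_possible_conditions_alt (incomplete_condition : String) (numbers : List Int) : List String :=
  pvGen incomplete_condition.toList numbers.sum

-- ===== PRECONDITION & SPEC =====
-- On the empty pattern with sum(numbers) == 0, A returns ["W"] (an artefact of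
-- '{0:b}'.format(0).zfill(0) being "0"), while B returns [""], the only completion
-- of the empty pattern, which is the intended value.
def D_get_all_possible_conditions (incomplete_condition : String) (numbers : List Int) : Prop :=
  incomplete_condition = "" ∧ numbers.sum = 0
instance (incomplete_condition : String) (numbers : List Int) : Decidable (D_get_all_possible_conditions incomplete_condition numbers) := by unfold D_get_all_possible_conditions; infer_instance

def Spec_get_all_possible_conditions (incomplete_condition : String) (numbers : List Int) (out : List String) : Prop := ¬ D_get_all_possible_conditions incomplete_condition numbers → out = get_all_possible_conditions_alt incomplete_condition numbers
instance (incomplete_condition : String) (numbers : List Int) (out : List String) : Decidable (Spec_get_all_possible_conditions incomplete_condition numbers out) := by unfold Spec_get_all_possible_conditions; infer_instance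

def pvDiffWitness_get_all_possible_conditions : String × List Int := ("", [])
def pvDiffWitnessOut_get_all_possible_conditions : (List String) × (List String) := (["W"], [""])

-- ===== CLAIM (what is proved, stated in full; the proofs are below) =====
def Claim_unchanged_get_all_possible_conditions : Prop := ∀ (incomplete_condition : String) (numbers : List Int), Dom_get_all_possible_conditions incomplete_condition numbers → Spec_get_all_possible_conditions incomplete_condition numbers (get_all_possible_conditions incomplete_condition numbers)
def Claim_changed_get_all_possible_conditions : Prop := Dom_get_all_possible_conditions (pvDiffWitness_get_all_possible_conditions.1) (pvDiffWitness_get_all_possible_conditions.2) ∧ D_get_all_possible_conditions (pvDiffWitness_get_all_possible_conditions.1) (pvDiffWitness_get_all_possible_conditions.2) ∧ get_all_possible_conditions (pvDiffWitness_get_all_possible_conditions.1) (pvDiffWitness_get_all_possible_conditions.2) = pvDiffWitnessOut_get_all_possible_conditions.1 ∧ get_all_possible_conditions_alt (pvDiffWitness_get_all_possible_conditions.1) (pvDiffWitness_get_all_possible_conditions.2) = pvDiffWitnessOut_get_all_possible_conditions.2 ∧ pvDiffWitnessOut_get_all_possible_conditions.1 ≠ pvDiffWitnessOut_get_all_pos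sible_conditions.2
def Claim_exact_get_all_possible_conditions : Prop := ∀ (incomplete_condition : String) (numbers : List Int), Dom_get_all_possible_conditions incomplete_condition numbers → D_get_all_possible_conditions incomplete_condition numbers → get_all_possible_conditions incomplete_condition numbers ≠ get_all_possible_conditions_alt incomplete_condition numbers

-- ===== LEMMAS AND PROOFS =====

-- the substitution performed by .replace("0","W").replace("1","B")
def pvSubst (c : Char) : Char := if c = '0' then 'W' else if c = '1' then 'B' else c

-- the L low bits of n, most significant first, as '0'/'1' characters
def pvBits : Nat → Nat → List Char
  | 0, _ => []
  | L + 1, n => (if n.testBit L then '1' else '0') :: pvBits L n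

-- the bitmask value A computes for a match set
def pvMask (cs : List Char) (m : List Char) : Nat :=
  match cs with
  | [] => 0
  | c :: rest => (if c ∈ m then 2 ^ rest.length else 0) + pvMask rest m

-- char-list version of pvGen
def pvGenL : List Char → Int → List (List Char)
  | cs, k =>
    if k < 0 then []
    else
      match cs with
      | [] => if k == 0 then [[]] else []
      | c :: rest =>
        if c == '?' then
          (pvGenL rest k).map ('W' :: ·) ++ (pvGenL rest (k - 1)).map ('B' :: ·)
        else if c == 'B' then (pvGenL rest (k - 1)).map ('B' :: ·)
        else (pvGenL rest k).map ('W' :: ·)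

-- the W/B string of n at width L
def pvWB (L n : Nat) : List Char := (pvBits L n).map pvSubst

-- A's loop, characterised over Nat: filter the full range, convert
def pvP (cs : List Char) (k : Int) (n : Nat) : Bool :=
  decide ((n &&& pvMask cs ['B']) = pvMask cs ['B']) &&
    decide ((n ||| pvMask cs ['B', '?']) = pvMask cs ['B', '?']) &&
    (((pvWB cs.length n).count 'B' : Int) == k)

def pvACore (cs : List Char) (k : Int) : List (List Char) :=
  ((List.range (2 ^ cs.length)).filter (pvP cs k)).map (fun n => pvWB cs.length n)

theorem pv_mask_lt (cs m : List Char) : pvMask cs m < 2 ^ cs.length := by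
  induction cs with
  | nil => simp [pvMask]
  | cons c rest ih =>
    have h2 : 0 < 2 ^ rest.length := Nat.two_pow_pos _
    simp only [pvMask, List.length_cons, pow_succ]
    split <;> omega

theorem pv_addMul_inj {k p q r s : Nat} (hq : q < 2 ^ k) (hs : s < 2 ^ k)
    (h : p * 2 ^ k + q = r * 2 ^ k + s) : p = r ∧ q = s := by
  have h2 : 0 < 2 ^ k := Nat.two_pow_pos _
  constructor
  · rcases Nat.lt_trichotomy p r with hpr | hpr | hpr
    · nlinarith [Nat.mul_le_mul_right (2 ^ k) (Nat.succ_le_of_lt hpr)]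
    · exact hpr
    · nlinarith [Nat.mul_le_mul_right (2 ^ k) (Nat.succ_le_of_lt hpr)]
  · rcases Nat.lt_trichotomy p r with hpr | hpr | hpr
    · nlinarith [Nat.mul_le_mul_right (2 ^ k) (Nat.succ_le_of_lt hpr)]
    · subst hpr; omega
    · nlinarith [Nat.mul_le_mul_right (2 ^ k) (Nat.succ_le_of_lt hpr)]

theorem pv_replace_go_single (o nw : Char) : ∀ (l acc : List Char) (fuel : Nat),
    l.length ≤ fuel →
    PySem.Chars.replace.go [o] [nw] fuel l acc
      = acc.reverse ++ l.map (fun c => if c = o then nw else c) := by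
  intro l
  induction l with
  | nil =>
    intro acc fuel _
    cases fuel <;> simp [PySem.Chars.replace.go]
  | cons c t ih =>
    intro acc fuel hf
    cases fuel with
    | zero => simp at hf
    | succ f =>
      simp only [PySem.Chars.replace.go]
      by_cases hco : o = c
      · subst hco
        rw [if_pos (by simp [List.isPrefixOf])]
        simp only [List.length_cons, List.length_nil, Nat.zero_add, List.drop_one,
          List.tail_cons, List.reverse_cons, List.reverse_nil, List.nil_append]
        rw [ih _ f (by simpa using hf)]
        simp
      · rw [if_neg (by simp [List.isPrefixOf, hco])]
        rw [ih _ f (by simpa using hf)]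
        simp [Ne.symm hco]

theorem pv_replace_single (l : List Char) (o nw : Char) :
    PySem.Chars.replace l [o] [nw] = l.map (fun c => if c = o then nw else c) := by
  rw [PySem.Chars.replace]
  rw [if_neg (by simp)]
  simpa using pv_replace_go_single o nw l [] l.length le_rfl

theorem pv_conv_replace (s : String) :
    (PySem.Str.replace (PySem.Str.replace s "0" "W") "1" "B").toList
      = s.toList.map pvSubst := by
  rw [PySem.Str.toList_replace, PySem.Str.toList_replace]
  rw [show ("0" : String).toList = ['0'] from rfl, show ("W" : String).toList = ['W'] from rfl,
    show ("1" : String).toList = ['1'] from rfl, show ("B" : String).toList = ['B'] from rfl]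
  rw [pv_replace_single, pv_replace_single, List.map_map]
  apply List.map_congr_left
  intro c _
  simp only [Function.comp, pvSubst]
  split_ifs <;> simp_all

theorem pv_zfill_digits (cs : List Char) (w : Nat)
    (h : ∀ c ∈ cs.take 1, c ≠ '+' ∧ c ≠ '-') :
    PySem.Chars.zfill cs (w : Int) = List.replicate (w - cs.length) '0' ++ cs := by
  rw [PySem.Chars.zfill.eq_def]
  by_cases hw : (w : Int) ≤ (cs.length : Int)
  · rw [if_pos hw]
    have : w - cs.length = 0 := by omega
    simp [this]
  · rw [if_neg hw]
    match cs with
    | [] => simp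
    | c :: rest =>
      have hc := h c (by simp)
      simp only []
      rw [if_neg (by tauto)]
      simp

theorem pv_bits_snoc (L n : Nat) :
    pvBits (L + 1) n = pvBits L (n / 2) ++ [if n.testBit 0 then '1' else '0'] := by
  induction L generalizing n with
  | zero => simp [pvBits]
  | succ L ih =>
    have h1 : pvBits (L + 2) n = (if n.testBit (L + 1) then '1' else '0') :: pvBits (L + 1) n := rfl
    rw [h1, ih]
    have h2 : pvBits (L + 1) (n / 2) = (if (n / 2).testBit L then '1' else '0') :: pvBits L (n / 2) := rfl
    rw [h2, Nat.testBit_add_one]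
    simp

theorem pv_digitChar_bit (n : Nat) :
    (n % 2).digitChar = if n.testBit 0 then '1' else '0' := by
  rcases Nat.mod_two_eq_zero_or_one n with h | h <;>
    simp [h, Nat.testBit_zero, Nat.digitChar]

theorem pv_toDigits_bits : ∀ (L n : Nat), 2 ^ L ≤ n → n < 2 ^ (L + 1) →
    Nat.toDigits 2 n = pvBits (L + 1) n := by
  intro L
  induction L with
  | zero =>
    intro n h1 h2
    have : n = 1 := by omega
    subst this
    rw [Nat.toDigits_of_lt_base (by norm_num)]
    decide
  | succ L ih =>
    intro n h1 h2
    have hn2 : 2 ≤ n := by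
      have : (2:Nat) ^ 1 ≤ 2 ^ (L + 1) := Nat.pow_le_pow_right (by norm_num) (by omega)
      simp at this; omega
    rw [Nat.toDigits_of_base_le (by norm_num) hn2]
    rw [ih (n / 2) (by omega) (by omega)]
    rw [pv_digitChar_bit, ← pv_bits_snoc]

theorem pv_zfill_bits : ∀ (L n : Nat), 1 ≤ L → n < 2 ^ L →
    PySem.Chars.zfill (Nat.toDigits 2 n) (L : Int) = pvBits L n := by
  intro L
  induction L with
  | zero => omega
  | succ L ih =>
    intro n _ hn
    have hdig : ∀ c ∈ (Nat.toDigits 2 n).take 1, c ≠ '+' ∧ c ≠ '-' := by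
      intro c hc
      have hmem : c ∈ Nat.toDigits 2 n := List.mem_of_mem_take hc
      have := Nat.isDigit_of_mem_toDigits (by norm_num) (by norm_num) hmem
      constructor <;> rintro rfl <;> simp [Char.isDigit] at this
    rcases Nat.eq_zero_or_pos L with hL | hL
    · subst hL
      interval_cases n <;> decide
    · by_cases hlow : n < 2 ^ L
      · have hlen : (Nat.toDigits 2 n).length ≤ L :=
          (Nat.length_toDigits_le_iff (by norm_num) hL).mpr hlow
        rw [pv_zfill_digits _ _ hdig]
        have hbit : n.testBit L = false := Nat.testBit_eq_false_of_lt hlow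
        have hrep : L + 1 - (Nat.toDigits 2 n).length = (L - (Nat.toDigits 2 n).length) + 1 := by omega
        rw [hrep, List.replicate_succ]
        have := ih n hL hlow
        rw [pv_zfill_digits _ _ hdig] at this
        simp [pvBits, hbit, this]
      · have hlen : ¬ (Nat.toDigits 2 n).length ≤ L :=
          fun h => hlow ((Nat.length_toDigits_le_iff (by norm_num) hL).mp h)
        have hlen2 : (Nat.toDigits 2 n).length ≤ L + 1 :=
          (Nat.length_toDigits_le_iff (by norm_num) (by omega)).mpr hn
        rw [PySem.Chars.zfill.eq_def, if_pos (by push_cast; omega)]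
        exact pv_toDigits_bits L n (by omega) hn

theorem pv_conv_exact (L n : Nat) (hL : 1 ≤ L) (hn : n < 2 ^ L) :
    convert_int_to_condition (n : Int) (L : Int) = String.ofList (pvWB L n) := by
  apply String.toList_inj.mp
  simp only [convert_int_to_condition]
  rw [pv_conv_replace]
  have htb : (PySem.Str.zfill (PySem.Int.toBin (n : Int)) (L : Int)).toList
      = PySem.Chars.zfill (Nat.toDigits 2 n) (L : Int) := by
    rw [PySem.Str.toList_zfill, PySem.Int.toList_toBin, PySem.Int.toBinChars]
    rw [if_neg (by simp)]
    simp
  rw [htb, pv_zfill_bits L n hL hn]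
  simp [pvWB]

theorem pv_sum_enum (m : List Char) (L : Nat) :
    ∀ (cs : List Char) (s0 : Nat), s0 + cs.length = L →
    ((PySem.List.enumerate cs (s0 : Int)).map
      (fun p => if p.2 ∈ m then (2 : Int) ^ (((L : Int) - p.1 - 1).toNat) else 0)).sum
      = (pvMask cs m : Int) := by
  intro cs
  induction cs with
  | nil => intro s0 _; simp [PySem.List.enumerate_nil, pvMask]
  | cons c rest ih =>
    intro s0 hL
    rw [PySem.List.enumerate_cons]
    simp only [List.map_cons, List.sum_cons]
    have h1 : (((L : Int) - s0 - 1).toNat) = rest.length := by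
      simp at hL; omega
    have h2 : ((s0 : Int) + 1) = ((s0 + 1 : Nat) : Int) := by push_cast; ring
    rw [h2, ih (s0 + 1) (by simp at hL ⊢; omega)]
    simp only [pvMask, h1]
    push_cast
    split <;> simp

theorem pv_mask_eq (s : String) (m : List Char) :
    convert_condition_to_int s m = (pvMask s.toList m : Int) := by
  simp only [convert_condition_to_int]
  have hstep : (fun (ret_val : Int) (p : Int × Char) =>
      if p.2 ∈ m then ret_val + 2 ^ (((s.toList.length : Int)) - p.1 - 1).toNat else ret_val)
      = (fun (ret_val : Int) (p : Int × Char) =>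
        ret_val + (if p.2 ∈ m then (2 : Int) ^ (((s.toList.length : Int)) - p.1 - 1).toNat else 0)) := by
    funext r p; split <;> simp
  rw [hstep, PySem.List.foldl_add]
  have h := pv_sum_enum m s.toList.length s.toList 0 (by simp)
  rw [show ((0 : Nat) : Int) = (0 : Int) from rfl] at h
  rw [h]
  simp

theorem pv_land_split (k y x v u : Nat) (hx : x < 2 ^ k) (hu : u < 2 ^ k) :
    (y * 2 ^ k + x) &&& (v * 2 ^ k + u) = (y &&& v) * 2 ^ k + (x &&& u) := by
  have hxu : x &&& u < 2 ^ k := lt_of_le_of_lt Nat.and_le_left hx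
  apply Nat.eq_of_testBit_eq
  intro i
  rw [Nat.testBit_and]
  rw [mul_comm y, mul_comm v, mul_comm (y &&& v)]
  rw [Nat.testBit_two_pow_mul_add _ hx, Nat.testBit_two_pow_mul_add _ hu,
    Nat.testBit_two_pow_mul_add _ hxu]
  by_cases hik : i < k
  · simp [hik, Nat.testBit_and]
  · simp [hik, Nat.testBit_and]

theorem pv_lor_split (k y x v u : Nat) (hx : x < 2 ^ k) (hu : u < 2 ^ k) :
    (y * 2 ^ k + x) ||| (v * 2 ^ k + u) = (y ||| v) * 2 ^ k + (x ||| u) := by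
  have hxu : x ||| u < 2 ^ k := Nat.or_lt_two_pow hx hu
  apply Nat.eq_of_testBit_eq
  intro i
  rw [Nat.testBit_or]
  rw [mul_comm y, mul_comm v, mul_comm (y ||| v)]
  rw [Nat.testBit_two_pow_mul_add _ hx, Nat.testBit_two_pow_mul_add _ hu,
    Nat.testBit_two_pow_mul_add _ hxu]
  by_cases hik : i < k
  · simp [hik, Nat.testBit_or]
  · simp [hik, Nat.testBit_or]

theorem pv_mask_cons (c : Char) (cs m : List Char) :
    pvMask (c :: cs) m = (if c ∈ m then 1 else 0) * 2 ^ cs.length + pvMask cs m := by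
  simp only [pvMask]; split <;> ring

theorem pv_bits_congr : ∀ (L n m : Nat), (∀ j, j < L → n.testBit j = m.testBit j) →
    pvBits L n = pvBits L m := by
  intro L
  induction L with
  | zero => intro n m _; rfl
  | succ L ih =>
    intro n m h
    simp only [pvBits, h L (by omega), ih n m (fun j hj => h j (by omega))]

theorem pv_bits_low (L n : Nat) (hn : n < 2 ^ L) :
    pvBits (L + 1) n = '0' :: pvBits L n := by
  simp [pvBits, Nat.testBit_eq_false_of_lt hn]

theorem pv_testBit_high (L n : Nat) (hn : n < 2 ^ L) :
    (2 ^ L + n).testBit L = true := by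
  have h := Nat.testBit_two_pow_mul_add 1 hn L
  simpa using h

theorem pv_bits_high (L n : Nat) (hn : n < 2 ^ L) :
    pvBits (L + 1) (2 ^ L + n) = '1' :: pvBits L n := by
  simp only [pvBits, pv_testBit_high L n hn, if_true]
  refine congrArg _ (pv_bits_congr L _ n fun j hj => ?_)
  have h := Nat.testBit_two_pow_mul_add 1 hn j
  simpa [hj] using h

theorem pv_ACore_neg (cs : List Char) (k : Int) (hk : k < 0) : pvACore cs k = [] := by
  simp only [pvACore, List.map_eq_nil_iff, List.filter_eq_nil_iff]
  intro n _
  simp only [pvP, Bool.and_eq_true, beq_iff_eq, decide_eq_true_eq, not_and]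
  intro _ _
  omega

theorem pv_core_eq : ∀ (cs : List Char) (k : Int), pvACore cs k = pvGenL cs k := by
  intro cs
  induction cs with
  | nil =>
    intro k
    rcases lt_or_ge k 0 with hk | hk
    · rw [pv_ACore_neg _ _ hk]; simp [pvGenL, hk]
    · simp only [pvACore, pvGenL, not_lt.mpr hk, if_neg (not_lt.mpr hk)]
      by_cases h0 : k = 0
      · subst h0; decide
      · have : ((0 : Int) == k) = false := by simp [Ne.symm h0]
        simp only [List.length_nil, pow_zero, List.range_one]
        simp [pvP, pvWB, pvBits, pvMask, Ne.symm h0, h0]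
  | cons c cs ih =>
    intro k
    rcases lt_or_ge k 0 with hk | hk
    · rw [pv_ACore_neg _ _ hk]; simp [pvGenL, hk]
    set L := cs.length with hLdef
    set A' := pvMask cs ['B'] with hA'
    set O' := pvMask cs ['B', '?'] with hO'
    have hA'lt : A' < 2 ^ L := pv_mask_lt cs _
    have hO'lt : O' < 2 ^ L := pv_mask_lt cs _
    set ba : Nat := if c ∈ ['B'] then 1 else 0 with hba
    set bo : Nat := if c ∈ ['B', '?'] then 1 else 0 with hbo
    have hmaskA : pvMask (c :: cs) ['B'] = ba * 2 ^ L + A' := pv_mask_cons c cs _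
    have hmaskO : pvMask (c :: cs) ['B', '?'] = bo * 2 ^ L + O' := pv_mask_cons c cs _
    -- predicate on the low half
    have hPlow : ∀ n, n < 2 ^ L →
        pvP (c :: cs) k n = (decide (ba = 0) && pvP cs k n) := by
      intro n hn
      have hand : n &&& (ba * 2 ^ L + A') = n &&& A' := by
        conv_lhs => rw [show n = 0 * 2 ^ L + n by ring]
        rw [pv_land_split L 0 n ba A' hn hA'lt]
        simp
      have hor : n ||| (bo * 2 ^ L + O') = bo * 2 ^ L + (n ||| O') := by
        conv_lhs => rw [show n = 0 * 2 ^ L + n by ring]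
        rw [pv_lor_split L 0 n bo O' hn hO'lt]
        simp
      have handA : ((n &&& (ba * 2 ^ L + A')) = ba * 2 ^ L + A') ↔ (ba = 0 ∧ n &&& A' = A') := by
        rw [hand]
        constructor
        · intro h
          have := pv_addMul_inj (k := L) (lt_of_le_of_lt Nat.and_le_left hn) hA'lt
            (show 0 * 2 ^ L + (n &&& A') = ba * 2 ^ L + A' by simpa using h)
          exact ⟨this.1.symm, this.2⟩
        · rintro ⟨h1, h2⟩; rw [h2, h1]; ring
      have horO : ((n ||| (bo * 2 ^ L + O')) = bo * 2 ^ L + O') ↔ (n ||| O' = O') := by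
        rw [hor]
        constructor
        · intro h
          exact (pv_addMul_inj (k := L) (Nat.or_lt_two_pow hn hO'lt) hO'lt
            (show bo * 2 ^ L + (n ||| O') = bo * 2 ^ L + O' from h)).2
        · intro h; rw [h]
      have hwb : pvWB (L + 1) n = 'W' :: pvWB L n := by
        simp [pvWB, pv_bits_low L n hn, pvSubst]
      simp only [pvP, List.length_cons, hmaskA, hmaskO, handA, horO, hwb,
        List.count_cons, Bool.decide_and]
      cases h1 : decide (ba = 0) <;> cases h2 : decide (n &&& A' = A') <;>
        cases h3 : decide (n ||| O' = O') <;> simp_all <;> rfl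
    -- predicate on the high half
    have hPhigh : ∀ n, n < 2 ^ L →
        pvP (c :: cs) k (2 ^ L + n) = (decide (bo = 1) && pvP cs (k - 1) n) := by
      intro n hn
      have hba01 : ba = 0 ∨ ba = 1 := by rw [hba]; split <;> simp
      have hbo01 : bo = 0 ∨ bo = 1 := by rw [hbo]; split <;> simp
      have hand : (2 ^ L + n) &&& (ba * 2 ^ L + A') = ba * 2 ^ L + (n &&& A') := by
        conv_lhs => rw [show 2 ^ L + n = 1 * 2 ^ L + n by ring]
        rw [pv_land_split L 1 n ba A' hn hA'lt]
        rcases hba01 with h | h <;> simp [h]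
      have hor : (2 ^ L + n) ||| (bo * 2 ^ L + O') = 1 * 2 ^ L + (n ||| O') := by
        conv_lhs => rw [show 2 ^ L + n = 1 * 2 ^ L + n by ring]
        rw [pv_lor_split L 1 n bo O' hn hO'lt]
        rcases hbo01 with h | h <;> simp [h]
      have handA : (((2 ^ L + n) &&& (ba * 2 ^ L + A')) = ba * 2 ^ L + A') ↔ (n &&& A' = A') := by
        rw [hand]
        constructor
        · intro h
          exact (pv_addMul_inj (k := L) (lt_of_le_of_lt Nat.and_le_left hn) hA'lt h).2
        · intro h; rw [h]
      have horO : (((2 ^ L + n) ||| (bo * 2 ^ L + O')) = bo * 2 ^ L + O') ↔ (bo = 1 ∧ n ||| O' = O') := by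
        rw [hor]
        constructor
        · intro h
          have := pv_addMul_inj (k := L) (Nat.or_lt_two_pow hn hO'lt) hO'lt h
          exact ⟨this.1.symm, this.2⟩
        · rintro ⟨h1, h2⟩; rw [h2, h1]
      have hwb : pvWB (L + 1) (2 ^ L + n) = 'B' :: pvWB L n := by
        simp [pvWB, pv_bits_high L n hn, pvSubst]
      have hcount : ((((pvWB L n).count 'B' + 1 : Nat) : Int) == k)
          = ((((pvWB L n).count 'B' : Nat) : Int) == k - 1) := by
        rcases Bool.eq_false_or_eq_true ((((pvWB L n).count 'B' : Nat) : Int) == k - 1) with h | h <;>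
          simp_all <;> omega
      simp only [pvP, List.length_cons, hmaskA, hmaskO, handA, horO, hwb,
        List.count_cons, if_pos rfl, Bool.decide_and]
      push_cast
      cases h1 : decide (bo = 1) <;> cases h2 : decide (n &&& A' = A') <;>
        cases h3 : decide (n ||| O' = O') <;> simp_all <;> push_cast <;> omega
    -- split the range into low and high halves
    have hrange : List.range (2 ^ (L + 1))
        = List.range (2 ^ L) ++ (List.range (2 ^ L)).map (fun n => 2 ^ L + n) := by
      rw [show 2 ^ (L + 1) = 2 ^ L + 2 ^ L by ring, List.range_add]
    have hACore : pvACore (c :: cs) k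
        = ((List.range (2 ^ L)).filter (pvP (c :: cs) k)).map (pvWB (L + 1))
          ++ (((List.range (2 ^ L)).map (fun n => 2 ^ L + n)).filter
                (pvP (c :: cs) k)).map (pvWB (L + 1)) := by
      simp only [pvACore, List.length_cons, ← hLdef]
      rw [hrange, List.filter_append, List.map_append]
    have hlow : ((List.range (2 ^ L)).filter (pvP (c :: cs) k)).map (pvWB (L + 1))
        = if ba = 0 then (pvACore cs k).map ('W' :: ·) else [] := by
      have hfl : (List.range (2 ^ L)).filter (pvP (c :: cs) k)
          = (List.range (2 ^ L)).filter (fun n => decide (ba = 0) && pvP cs k n) :=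
        List.filter_congr (fun n hn => hPlow n (List.mem_range.mp hn))
      by_cases hba0 : ba = 0
      · rw [if_pos hba0, hfl]
        simp only [hba0, decide_true, Bool.true_and]
        rw [List.map_congr_left (fun n hn => by
          have hnlt : n < 2 ^ L := List.mem_range.mp (List.mem_of_mem_filter hn)
          show pvWB (L + 1) n = 'W' :: pvWB L n
          simp [pvWB, pv_bits_low L n hnlt, pvSubst])]
        rw [show (fun n => 'W' :: pvWB L n) = ('W' :: ·) ∘ (fun n => pvWB L n) from rfl]
        rw [← List.map_map]
        rfl
      · rw [if_neg hba0, hfl]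
        simp [hba0]
    have hhigh : (((List.range (2 ^ L)).map (fun n => 2 ^ L + n)).filter
          (pvP (c :: cs) k)).map (pvWB (L + 1))
        = if bo = 1 then (pvACore cs (k - 1)).map ('B' :: ·) else [] := by
      rw [List.filter_map]
      have hfh : (List.range (2 ^ L)).filter ((pvP (c :: cs) k) ∘ (fun n => 2 ^ L + n))
          = (List.range (2 ^ L)).filter (fun n => decide (bo = 1) && pvP cs (k - 1) n) :=
        List.filter_congr (fun n hn => hPhigh n (List.mem_range.mp hn))
      by_cases hbo1 : bo = 1
      · rw [if_pos hbo1, hfh]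
        simp only [hbo1, decide_true, Bool.true_and]
        rw [List.map_map]
        rw [List.map_congr_left (fun n hn => by
          have hnlt : n < 2 ^ L := List.mem_range.mp (List.mem_of_mem_filter hn)
          show pvWB (L + 1) (2 ^ L + n) = 'B' :: pvWB L n
          simp [pvWB, pv_bits_high L n hnlt, pvSubst])]
        rw [show (fun n => 'B' :: pvWB L n) = ('B' :: ·) ∘ (fun n => pvWB L n) from rfl]
        rw [← List.map_map]
        rfl
      · rw [if_neg hbo1, hfh]
        simp [hbo1]
    rw [hACore, hlow, hhigh, ih k, ih (k - 1)]
    by_cases hq : c = '?'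
    · subst hq
      have hba0 : ba = 0 := by simp [hba]
      have hbo1 : bo = 1 := by simp [hbo]
      rw [if_pos hba0, if_pos hbo1]
      conv_rhs => rw [pvGenL]
      rw [if_neg (not_lt.mpr hk)]
      simp
    · by_cases hB : c = 'B'
      · subst hB
        have hba0 : ¬ ba = 0 := by simp [hba]
        have hbo1 : bo = 1 := by simp [hbo]
        rw [if_neg hba0, if_pos hbo1]
        conv_rhs => rw [pvGenL]
        rw [if_neg (not_lt.mpr hk)]
        simp
      · have hba0 : ba = 0 := by simp [hba, hB]
        have hbo1 : ¬ bo = 1 := by simp [hbo, hB, hq]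
        rw [if_pos hba0, if_neg hbo1]
        conv_rhs => rw [pvGenL]
        rw [if_neg (not_lt.mpr hk)]
        simp [hq, hB]

theorem pv_app_str (s : String) (l : List Char) :
    s ++ String.ofList l = String.ofList (s.toList ++ l) := by
  apply String.toList_inj.mp
  simp

theorem pv_nil_str : String.ofList [] = "" := by
  apply String.toList_inj.mp
  rfl

theorem pv_compW : ((fun t => ("W" : String) ++ t) ∘ String.ofList)
    = String.ofList ∘ ('W' :: ·) := by
  funext t
  simp only [Function.comp_apply, pv_app_str]
  rfl

theorem pv_compB : ((fun t => ("B" : String) ++ t) ∘ String.ofList)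
    = String.ofList ∘ ('B' :: ·) := by
  funext t
  simp only [Function.comp_apply, pv_app_str]
  rfl

theorem pv_B_eq_core : ∀ (cs : List Char) (k : Int),
    pvGen cs k = (pvGenL cs k).map String.ofList := by
  intro cs
  induction cs with
  | nil =>
    intro k
    rw [pvGen, pvGenL]
    split
    · simp
    · split <;> simp [pv_nil_str]
  | cons c rest ih =>
    intro k
    rw [pvGen, pvGenL]
    split
    · simp
    · split
      · rw [ih k, ih (k - 1)]
        simp only [List.map_append, List.map_map, pv_compW, pv_compB]
      · split
        · rw [ih (k - 1)]
          simp only [List.map_map, pv_compB]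
        · rw [ih k]
          simp only [List.map_map, pv_compW]

theorem pv_A_empty (numbers : List Int) :
    get_all_possible_conditions "" numbers
      = if (0 : Int) == numbers.sum then ["W"] else [] := by
  simp only [get_all_possible_conditions]
  rw [show ("" : String).toList = [] from rfl]
  rw [show PySem.List.pyRange (convert_condition_to_int "" ['B'])
      ((2 : Int) ^ ((([] : List Char).length : Int)).toNat) 1 = [0] by decide]
  rw [List.foldl_cons, List.foldl_nil]
  rw [if_pos (by decide)]
  rw [show convert_int_to_condition 0 (([] : List Char).length : Int) = "W" by decide]
  simp only [has_correct_number_of_broken_pumps]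
  have h : (PySem.Dict.counter ("W" : String).toList).getD 'B' 0 = (0 : Int) := by
    rw [PySem.Dict.getD_counter]
    decide
  simp only [h, List.nil_append]

theorem pv_beq_cast (a b : Nat) : (((a : Int)) == ((b : Int))) = decide (a = b) := by
  rcases eq_or_ne a b with h | h <;> simp [h]

theorem pv_A_eq_core (s : String) (numbers : List Int) (hs : s.toList ≠ []) :
    get_all_possible_conditions s numbers
      = (pvACore s.toList numbers.sum).map String.ofList := by
  have hL1 : 1 ≤ s.toList.length := List.length_pos_iff.mpr hs
  simp only [get_all_possible_conditions]
  rw [pv_mask_eq s ['B'], pv_mask_eq s ['B', '?']]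
  set cs := s.toList with hcs
  set L := cs.length with hLdef
  set k := numbers.sum with hkdef
  set A : Nat := pvMask cs ['B'] with hAdef
  set O : Nat := pvMask cs ['B', '?'] with hOdef
  -- normalise the upper bound
  have hmax : (2 : Int) ^ ((L : Int)).toNat = ((2 ^ L : Nat) : Int) := by
    rw [Int.toNat_natCast]; push_cast; ring
  rw [hmax]
  -- single-test form of the loop body
  have hstep : (fun (ret_val : List String) (i : Int) =>
      if (PySem.Int.band i (A : Int) == (A : Int)) && (PySem.Int.bor i (O : Int) == (O : Int)) then
        if has_correct_number_of_broken_pumps (convert_int_to_condition i (L : Int)) k then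
          ret_val ++ [convert_int_to_condition i (L : Int)]
        else ret_val
      else ret_val)
      = (fun (ret_val : List String) (i : Int) =>
        if ((PySem.Int.band i (A : Int) == (A : Int)) && (PySem.Int.bor i (O : Int) == (O : Int)))
            && has_correct_number_of_broken_pumps (convert_int_to_condition i (L : Int)) k then
          ret_val ++ [convert_int_to_condition i (L : Int)]
        else ret_val) := by
    funext r i
    by_cases h1 : (PySem.Int.band i (A : Int) == (A : Int)) && (PySem.Int.bor i (O : Int) == (O : Int)) <;>
      by_cases h2 : has_correct_number_of_broken_pumps (convert_int_to_condition i (L : Int)) k <;>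
      simp [h1, h2]
  rw [hstep, PySem.List.foldl_append_if]
  rw [List.nil_append]
  -- extend the range downwards to 0
  have hAle : (A : Int) ≤ ((2 ^ L : Nat) : Int) := by
    exact_mod_cast le_of_lt (pv_mask_lt cs ['B'])
  have hfilter0 : (PySem.List.pyRange 0 ((2 ^ L : Nat) : Int) 1).filter
        (fun i => ((PySem.Int.band i (A : Int) == (A : Int)) && (PySem.Int.bor i (O : Int) == (O : Int)))
          && has_correct_number_of_broken_pumps (convert_int_to_condition i (L : Int)) k)
      = (PySem.List.pyRange (A : Int) ((2 ^ L : Nat) : Int) 1).filter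
        (fun i => ((PySem.Int.band i (A : Int) == (A : Int)) && (PySem.Int.bor i (O : Int) == (O : Int)))
          && has_correct_number_of_broken_pumps (convert_int_to_condition i (L : Int)) k) := by
    rw [PySem.List.pyRange_one_append 0 (A : Int) ((2 ^ L : Nat) : Int) (by positivity) hAle]
    rw [List.filter_append]
    have hnil : (PySem.List.pyRange 0 (A : Int) 1).filter
        (fun i => ((PySem.Int.band i (A : Int) == (A : Int)) && (PySem.Int.bor i (O : Int) == (O : Int)))
          && has_correct_number_of_broken_pumps (convert_int_to_condition i (L : Int)) k) = [] := by
      rw [List.filter_eq_nil_iff]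
      intro i hi
      obtain ⟨hi0, hiA⟩ := PySem.List.mem_pyRange_one.mp hi
      have hband : (PySem.Int.band i (A : Int) == (A : Int)) = false := by
        rw [show i = ((i.toNat : Nat) : Int) by omega, PySem.Int.band_natCast, pv_beq_cast]
        simp only [decide_eq_false_iff_not]
        intro hEq
        have h1 : A ≤ i.toNat := by
          conv_lhs => rw [← hEq]
          exact Nat.and_le_left
        omega
      simp [hband]
    rw [hnil, List.nil_append]
  rw [← hfilter0]
  -- move to List.range over Nat
  have hr : PySem.List.pyRange 0 ((2 ^ L : Nat) : Int) 1
      = (List.range (2 ^ L)).map (fun (n : Nat) => (n : Int)) := by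
    rw [PySem.List.pyRange_one]
    simp only [sub_zero, Int.toNat_natCast, zero_add]
  rw [hr, List.filter_map, List.map_map]
  -- identify the predicate and the conversion
  have hpred : ∀ n ∈ List.range (2 ^ L),
      ((fun i => ((PySem.Int.band i (A : Int) == (A : Int)) && (PySem.Int.bor i (O : Int) == (O : Int)))
          && has_correct_number_of_broken_pumps (convert_int_to_condition i (L : Int)) k)
        ∘ (fun n : Nat => (n : Int))) n = pvP cs k n := by
    intro n hn
    have hnlt : n < 2 ^ L := List.mem_range.mp hn
    simp only [Function.comp_apply]
    rw [PySem.Int.band_natCast, PySem.Int.bor_natCast, pv_beq_cast, pv_beq_cast]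
    rw [pv_conv_exact L n hL1 hnlt]
    simp only [has_correct_number_of_broken_pumps, String.toList_ofList]
    rw [PySem.Dict.getD_counter]
    rfl
  rw [List.filter_congr hpred]
  rw [List.map_congr_left (fun n hn => by
    have hnlt : n < 2 ^ L := List.mem_range.mp (List.mem_of_mem_filter hn)
    show ((fun i => convert_int_to_condition i (L : Int)) ∘ (fun n : Nat => (n : Int))) n
      = (String.ofList ∘ fun n => pvWB L n) n
    simp only [Function.comp_apply]
    exact pv_conv_exact L n hL1 hnlt)]
  rw [← List.map_map]
  rfl

-- ===== VERDICT (by name: the statement is the Claim_ definition above) =====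
theorem get_all_possible_conditions_spec : Claim_unchanged_get_all_possible_conditions := by
  intro s numbers _ hD
  show get_all_possible_conditions s numbers = get_all_possible_conditions_alt s numbers
  by_cases hnil : s.toList = []
  · have hs : s = "" := String.toList_inj.mp (by rw [hnil]; rfl)
    subst hs
    have hsum : numbers.sum ≠ 0 := by
      intro h; exact hD ⟨rfl, h⟩
    rw [pv_A_empty]
    simp only [get_all_possible_conditions_alt]
    rw [show ("" : String).toList = [] from rfl]
    rw [pv_B_eq_core]
    simp only [pvGenL]
    rcases lt_trichotomy numbers.sum 0 with h | h | h
    · simp [h, beq_iff_eq, Ne.symm hsum]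
    · exact absurd h hsum
    · simp only [not_lt.mpr (le_of_lt h), if_false, beq_iff_eq]
      rw [if_neg (by omega)]
      simpa using hsum
  · rw [pv_A_eq_core s numbers hnil, pv_core_eq]
    simp only [get_all_possible_conditions_alt]
    rw [pv_B_eq_core]

theorem get_all_possible_conditions_changed : Claim_changed_get_all_possible_conditions := by
  unfold Claim_changed_get_all_possible_conditions; decide

theorem get_all_possible_conditions_tight : Claim_exact_get_all_possible_conditions := by
  intro s numbers _ hD
  obtain ⟨hs, hsum⟩ := hD
  subst hs
  rw [pv_A_empty, hsum]
  simp only [get_all_possible_conditions_alt]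
  rw [show ("" : String).toList = [] from rfl, hsum]
  decide
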